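-- pv_equiv track=rewrite | github.com/sonukkushwaha0801/Leetcode_Solution_in_Python | 2597. The Number of Beautiful Subsets.py | beautifulSubsets
-- ===== SOURCE A (Python) =====
-- from typing import Counter, List
--
-- def beautifulSubsets(nums: List[int], k: int) -> int:
--     buckets = [[] for _ in range(k)]
--     for n in nums:
--         buckets[n % k].append(n)
--
--     def dp(bu):
--         cnt = Counter(bu)
--         arr = sorted((key, val) for key, val in cnt.items())
--         dp_y, dp_n = 2**arr[0][1]-1, 1
--         for i, (key, val) in enumerate(arr[1:], start=1):
--             tmp = 2**val-1
--             if key - arr[i-1][0] == k: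
--                 dp_y, dp_n = dp_n*tmp, dp_y+dp_n
--             else:
--                 dp_y, dp_n = (dp_y+dp_n)*tmp, dp_y+dp_n
--         return dp_y + dp_n
--
--     ans = 1
--     for bu in buckets:
--         if bu:
--             ans *= dp(bu)
--     return ans - 1
-- ===== SOURCE B (Python) =====
-- from typing import Counter, List
--
-- def beautifulSubsets(nums: List[int], k: int) -> int:
--     cnt = Counter()
--
--     def bt(i):
--         if i == len(nums):
--             return 1
--         total = bt(i + 1)
--         x = nums[i]
--         if cnt[x - k] == 0 and cnt[x + k] == 0:
--             cnt[x] += 1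
--             total += bt(i + 1)
--             cnt[x] -= 1
--         return total
--
--     return bt(0) - 1
-- ===== Notes on version B (the rewrite author's own statement) =====
-- stated objective: alternative
-- what changed: B discards A's residue buckets, Counter-sorting and forward (dp_y, dp_n) product formula and instead counts by plain backtracking over the indices of nums, carrying a Counter of the values included so far (include nums[i] only when count[x-k]==0 and count[x+k]==0), summing 1 per complete choice and subtracting 1 for the empty subset.
import Mathlib
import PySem

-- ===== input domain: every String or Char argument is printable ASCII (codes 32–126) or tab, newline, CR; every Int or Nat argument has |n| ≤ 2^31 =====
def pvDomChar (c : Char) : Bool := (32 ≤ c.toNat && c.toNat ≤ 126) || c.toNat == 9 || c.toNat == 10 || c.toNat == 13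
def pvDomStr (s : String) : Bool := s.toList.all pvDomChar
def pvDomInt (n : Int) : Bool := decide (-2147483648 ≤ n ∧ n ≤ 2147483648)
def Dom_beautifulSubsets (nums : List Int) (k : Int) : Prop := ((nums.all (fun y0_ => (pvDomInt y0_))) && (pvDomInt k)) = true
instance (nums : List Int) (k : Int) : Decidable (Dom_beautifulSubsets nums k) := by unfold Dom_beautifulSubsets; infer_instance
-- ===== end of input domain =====

-- B replaces A's residue-bucket + sorted-count DP by plain backtracking over the indices of nums
-- with a Counter of included values (objective: alternative; not faster).

-- ===== PORT A =====
-- the for-loop over arr[1:] with arr[i-1][0] as the previous key, carrying (dp_y, dp_n)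
def pvDpLoopA (k prev y n : Int) : List (Int × Int) → Int
  | [] => y + n
  | (key, v) :: rest =>
      let tmp := (2 : Int) ^ v.toNat - 1
      if key - prev = k then pvDpLoopA k key (n * tmp) (y + n) rest
      else pvDpLoopA k key ((y + n) * tmp) (y + n) rest

-- dp(bu): Counter, sorted items, then the loop (arr is nonempty whenever bu is; 0 on [] is unreachable)
def pvDpA (k : Int) (bu : List Int) : Int :=
  match PySem.List.sorted2 (PySem.Dict.counter bu).items (fun p => p.1) (fun p => p.2) with
  | [] => 0
  | (k0, v0) :: rest => pvDpLoopA k k0 ((2 : Int) ^ v0.toNat - 1) 1 rest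

def beautifulSubsets (nums : List Int) (k : Int) : Int :=
  let buckets : List (List Int) :=
    nums.foldl (fun bs n =>
      let i := (PySem.Int.mod n k).toNat
      bs.set i (bs.getD i [] ++ [n])) (List.replicate k.toNat [])
  (buckets.foldl (fun ans bu => if bu = [] then ans else ans * pvDpA k bu) 1) - 1

-- ===== PORT B =====
-- bt(i) of Source B: structural recursion over the remaining suffix of nums, carrying the Counter cnt;
-- exclude-branch first, include-branch guarded by cnt[x-k]==0 and cnt[x+k]==0 (Counter lookup = getD 0)
def pvBT (k : Int) (cnt : PySem.Dict Int Int) : List Int → Int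
  | [] => 1
  | x :: rest =>
      let total := pvBT k cnt rest
      if cnt.getD (x - k) 0 = 0 ∧ cnt.getD (x + k) 0 = 0 then
        total + pvBT k (cnt.modify x 0 (· + 1)) rest
      else total

def beautifulSubsets_alt (nums : List Int) (k : Int) : Int :=
  pvBT k PySem.Dict.empty nums - 1

-- ===== PRECONDITION & SPEC =====
-- Pre_ excludes exactly the inputs on which A raises: with nonempty nums, k = 0 gives
-- ZeroDivisionError (n % 0) and k < 0 gives IndexError (the bucket list is empty).
def Pre_beautifulSubsets (nums : List Int) (k : Int) : Prop := 1 ≤ k ∨ nums = []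
instance (nums : List Int) (k : Int) : Decidable (Pre_beautifulSubsets nums k) := by
  unfold Pre_beautifulSubsets; infer_instance

def pvWitness_beautifulSubsets : List Int × Int := ([2, 4, 6, 2], 2)

def Spec_beautifulSubsets (nums : List Int) (k : Int) (out : Int) : Prop := out = beautifulSubsets_alt nums k
instance (nums : List Int) (k : Int) (out : Int) : Decidable (Spec_beautifulSubsets nums k out) := by
  unfold Spec_beautifulSubsets; infer_instance

-- ===== CLAIM (what is proved, stated in full; the proofs are below) =====
def Claim_equal_beautifulSubsets : Prop := ∀ (nums : List Int) (k : Int), Dom_beautifulSubsets nums k → Pre_beautifulSubsets nums k → Spec_beautifulSubsets nums k (beautifulSubsets nums k)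

-- ===== LEMMAS AND PROOFS =====

-- proof-side value of both programs on one residue class: skip/take recursion over the
-- sorted distinct (value, multiplicity) pairs
def pvF (k : Int) : List (Int × Int) → Int
  | [] => 1
  | [(_, m)] => 1 + ((2 : Int) ^ m.toNat - 1) * 1
  | (v, m) :: (v', m') :: rest2 =>
      let skip := pvF k ((v', m') :: rest2)
      skip + (if v' = v + k then ((2 : Int) ^ m.toNat - 1) * pvF k rest2
              else ((2 : Int) ^ m.toNat - 1) * skip)

-- what the take-branch of pvF sees after the head
def pvH (k prev : Int) : List (Int × Int) → Int
  | [] => 1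
  | (v, m) :: rest => if v = prev + k then pvF k rest else pvF k ((v, m) :: rest)

theorem pvF_cons (k v m : Int) (rest : List (Int × Int)) :
    pvF k ((v, m) :: rest) = pvF k rest + ((2 : Int) ^ m.toNat - 1) * pvH k v rest := by
  cases rest with
  | nil => simp [pvF, pvH]
  | cons p rest2 =>
      obtain ⟨v', m'⟩ := p
      simp only [pvF, pvH]
      split_ifs <;> ring

theorem pvH_nil (k prev : Int) : pvH k prev [] = 1 := rfl

theorem pvH_cons (k prev v m : Int) (rest : List (Int × Int)) :
    pvH k prev ((v, m) :: rest) = if v = prev + k then pvF k rest else pvF k ((v, m) :: rest) := rfl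

theorem pvDpLoopA_eq (k : Int) : ∀ (l : List (Int × Int)) (prev y n : Int),
    pvDpLoopA k prev y n l = n * pvF k l + y * pvH k prev l := by
  intro l
  induction l with
  | nil => intro prev y n; simp [pvDpLoopA, pvF, pvH_nil]; ring
  | cons p rest ih =>
      obtain ⟨key, v⟩ := p
      intro prev y n
      rw [pvF_cons, pvH_cons]
      by_cases h : key = prev + k
      · have hd : key - prev = k := by omega
        have hstep : pvDpLoopA k prev y n ((key, v) :: rest)
            = pvDpLoopA k key (n * ((2 : Int) ^ v.toNat - 1)) (y + n) rest := by
          simp [pvDpLoopA, hd]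
        rw [hstep, ih, if_pos h]
        ring
      · have hd : ¬ (key - prev = k) := by omega
        have hstep : pvDpLoopA k prev y n ((key, v) :: rest)
            = pvDpLoopA k key ((y + n) * ((2 : Int) ^ v.toNat - 1)) (y + n) rest := by
          simp [pvDpLoopA, hd]
        rw [hstep, ih, if_neg h, pvF_cons]
        ring

theorem pvDpA_eq_count (k : Int) (bu : List Int) (hbu : bu ≠ []) :
    pvDpA k bu = pvF k (PySem.List.sorted2 (PySem.Dict.counter bu).items (fun p => p.1) (fun p => p.2)) := by
  have hitems : (PySem.Dict.counter bu).items ≠ [] := by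
    rw [PySem.Dict.items_counter]
    intro h
    rcases List.exists_mem_of_ne_nil bu hbu with ⟨x, hx⟩
    have : x ∈ PySem.Set.ofList bu := (PySem.Set.mem_ofList bu x).mpr hx
    simp [List.map_eq_nil_iff.mp h] at this
  have harr : PySem.List.sorted2 (PySem.Dict.counter bu).items (fun p => p.1) (fun p => p.2) ≠ [] := by
    intro h
    have hp := PySem.List.sorted2_perm (PySem.Dict.counter bu).items (fun p => p.1) (fun p => p.2) false
    rw [h] at hp
    exact hitems hp.symm.eq_nil
  rcases hl : PySem.List.sorted2 (PySem.Dict.counter bu).items (fun p => p.1) (fun p => p.2) with _ | ⟨⟨k0, v0⟩, rest⟩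
  · exact absurd hl harr
  · simp only [pvDpA, hl]
    rw [pvDpLoopA_eq, pvF_cons]
    ring

-- ---- A-side: the bucket-building fold is a map of filters over range k ----
theorem bucket_fold (k : Int) : ∀ (l : List Int) (bs : List (List Int)),
    (∀ n ∈ l, (PySem.Int.mod n k).toNat < bs.length) →
    List.foldl (fun bs n =>
      let i := (PySem.Int.mod n k).toNat
      bs.set i (bs.getD i [] ++ [n])) bs l
    = (List.range bs.length).map
        (fun i => bs.getD i [] ++ l.filter (fun n => (PySem.Int.mod n k).toNat == i)) := by
  intro l
  induction l with
  | nil =>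
      intro bs _
      simp only [List.foldl_nil, List.filter_nil, List.append_nil]
      apply List.ext_getElem
      · simp
      · intro i h1 h2
        simp [List.getElem?_eq_getElem h1]
  | cons n l ih =>
      intro bs h
      have hi0 : (PySem.Int.mod n k).toNat < bs.length := h n (List.mem_cons_self ..)
      rw [List.foldl_cons]
      have hlen : (bs.set (PySem.Int.mod n k).toNat
          (bs.getD (PySem.Int.mod n k).toNat [] ++ [n])).length = bs.length := by
        simp
      rw [ih _ (by intro m hm; rw [hlen]; exact h m (List.mem_cons_of_mem _ hm)), hlen]
      apply List.map_congr_left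
      intro i hi
      rw [List.mem_range] at hi
      rw [List.filter_cons]
      by_cases hc : (PySem.Int.mod n k).toNat = i
      · subst hc
        rw [List.getD_eq_getElem _ _ (by simpa using hi), List.getElem_set]
        simp [List.append_assoc]
      · rw [List.getD_eq_getElem _ _ (by simpa using hi), List.getElem_set]
        simp [hc, List.getElem?_eq_getElem hi]

theorem foldl_if_mul_prod (k : Int) : ∀ (l : List (List Int)) (a : Int),
    l.foldl (fun ans bu => if bu = [] then ans else ans * pvDpA k bu) a
    = a * (l.map (fun bu => if bu = [] then 1 else pvDpA k bu)).prod := by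
  intro l
  induction l with
  | nil => intro a; simp
  | cons x l ih =>
      intro a
      by_cases h : x = [] <;> simp [h, ih, mul_assoc]

-- the common per-residue factor
def pvG (nums : List Int) (k r : Int) : Int :=
  pvF k (PySem.List.sorted2
    (PySem.Dict.counter (nums.filter (fun n => PySem.Int.mod n k == r))).items
    (fun p => p.1) (fun p => p.2))

theorem portA_eq (nums : List Int) (k : Int) (hk : 1 ≤ k) :
    beautifulSubsets nums k
    = ((List.range k.toNat).map (fun i : Nat =>
        if nums.filter (fun n => PySem.Int.mod n k == (i : Int)) = [] then 1
        else pvG nums k (i : Int))).prod - 1 := by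
  simp only [beautifulSubsets]
  rw [bucket_fold k nums _ (by
    intro n _
    rw [List.length_replicate]
    have h0 := PySem.Int.mod_nonneg n (show (0:Int) < k by omega)
    have h1 := PySem.Int.mod_lt n (show (0:Int) < k by omega)
    omega)]
  rw [List.length_replicate, foldl_if_mul_prod, one_mul]
  congr 1
  rw [List.map_map]
  apply congrArg List.prod
  apply List.map_congr_left
  intro i hi
  rw [List.mem_range] at hi
  have hrep : (List.replicate k.toNat ([] : List Int)).getD i [] = [] := by
    simp [List.getD]
  have hfilt : nums.filter (fun n => (PySem.Int.mod n k).toNat == i)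
      = nums.filter (fun n => PySem.Int.mod n k == (i : Int)) := by
    apply List.filter_congr
    intro n _
    have h0 := PySem.Int.mod_nonneg n (show (0:Int) < k by omega)
    by_cases h : PySem.Int.mod n k = (i : Int)
    · have h' : (PySem.Int.mod n k).toNat = i := by omega
      simp [h, h']
    · have h' : (PySem.Int.mod n k).toNat ≠ i := by omega
      simp [h, h']
  simp only [Function.comp_apply]
  rw [hrep, List.nil_append, hfilt]
  by_cases hf : nums.filter (fun n => PySem.Int.mod n k == (i : Int)) = []
  · simp [hf]
  · rw [if_neg hf, if_neg hf, pvDpA_eq_count k _ hf]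
    rfl

-- ---- B-side basics: nonnegative counters, congruence, permutation invariance ----
def pvNN (c : PySem.Dict Int Int) : Prop := ∀ z : Int, 0 ≤ c.getD z 0

theorem pvNN_empty : pvNN PySem.Dict.empty := by
  intro z; rw [PySem.Dict.getD_empty]

theorem pvNN_add (c : PySem.Dict Int Int) (v : Int) (hc : pvNN c) :
    pvNN (c.modify v 0 (· + 1)) := by
  intro z
  rw [PySem.Dict.getD_modify]
  split_ifs with h
  · have := hc v; omega
  · exact hc z

theorem getD_add_eq_zero (c : PySem.Dict Int Int) (hc : pvNN c) (a b : Int) :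
    ((c.modify a 0 (· + 1)).getD b 0 = 0) ↔ (c.getD b 0 = 0 ∧ b ≠ a) := by
  rw [PySem.Dict.getD_modify]
  rcases eq_or_ne b a with rfl | h
  · have h0 := hc b
    constructor
    · intro h2; rw [if_pos rfl] at h2; exact absurd h2 (by omega)
    · rintro ⟨_, h2⟩; exact absurd rfl h2
  · simp [h]

theorem getD_modify_modify_comm (c : PySem.Dict Int Int) (a b z : Int) :
    ((c.modify a 0 (· + 1)).modify b 0 (· + 1)).getD z 0
      = ((c.modify b 0 (· + 1)).modify a 0 (· + 1)).getD z 0 := by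
  simp only [PySem.Dict.getD_modify]
  rcases eq_or_ne z a with rfl | ha <;> rcases eq_or_ne z b with rfl | hb <;>
    simp_all

theorem pvBT_cons (k x : Int) (c : PySem.Dict Int Int) (l : List Int) :
    pvBT k c (x :: l) = pvBT k c l +
      (if c.getD (x - k) 0 = 0 ∧ c.getD (x + k) 0 = 0 then pvBT k (c.modify x 0 (· + 1)) l else 0) := by
  by_cases h : c.getD (x - k) 0 = 0 ∧ c.getD (x + k) 0 = 0 <;> simp [pvBT, h]

theorem pvBT_congr (k : Int) : ∀ (l : List Int) (c c' : PySem.Dict Int Int), pvNN c → pvNN c' →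
    (∀ y ∈ l, ((c.getD (y - k) 0 = 0) ↔ (c'.getD (y - k) 0 = 0)) ∧
              ((c.getD (y + k) 0 = 0) ↔ (c'.getD (y + k) 0 = 0))) →
    pvBT k c l = pvBT k c' l := by
  intro l
  induction l with
  | nil => intro c c' _ _ _; rfl
  | cons x rest ih =>
      intro c c' hc hc' h
      have hx := h x (List.mem_cons_self ..)
      have hrest : ∀ y ∈ rest, ((c.getD (y - k) 0 = 0) ↔ (c'.getD (y - k) 0 = 0)) ∧
          ((c.getD (y + k) 0 = 0) ↔ (c'.getD (y + k) 0 = 0)) :=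
        fun y hy => h y (List.mem_cons_of_mem _ hy)
      rw [pvBT_cons, pvBT_cons, ih c c' hc hc' hrest]
      congr 1
      have hiff : (c.getD (x - k) 0 = 0 ∧ c.getD (x + k) 0 = 0)
          ↔ (c'.getD (x - k) 0 = 0 ∧ c'.getD (x + k) 0 = 0) := by
        constructor <;> rintro ⟨h1, h2⟩
        · exact ⟨hx.1.mp h1, hx.2.mp h2⟩
        · exact ⟨hx.1.mpr h1, hx.2.mpr h2⟩
      by_cases hcase : c.getD (x - k) 0 = 0 ∧ c.getD (x + k) 0 = 0
      · rw [if_pos hcase, if_pos (hiff.mp hcase)]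
        apply ih _ _ (pvNN_add c x hc) (pvNN_add c' x hc')
        intro y hy
        rw [getD_add_eq_zero c hc, getD_add_eq_zero c hc, getD_add_eq_zero c' hc',
          getD_add_eq_zero c' hc']
        have := hrest y hy
        constructor <;> constructor <;> rintro ⟨u, w⟩ <;>
          exact ⟨by tauto, w⟩
      · rw [if_neg hcase, if_neg (fun hcc => hcase (hiff.mpr hcc))]

theorem pvBT_swap (k x y : Int) (l : List Int) (c : PySem.Dict Int Int) (hc : pvNN c) :
    pvBT k c (y :: x :: l) = pvBT k c (x :: y :: l) := by
  have hD : pvBT k ((c.modify y 0 (· + 1)).modify x 0 (· + 1)) l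
      = pvBT k ((c.modify x 0 (· + 1)).modify y 0 (· + 1)) l := by
    apply pvBT_congr k l _ _ (pvNN_add _ x (pvNN_add c y hc)) (pvNN_add _ y (pvNN_add c x hc))
    intro z _
    rw [getD_modify_modify_comm c y x, getD_modify_modify_comm c y x]
    exact ⟨Iff.rfl, Iff.rfl⟩
  simp only [pvBT_cons]
  rw [hD]
  by_cases hR : x ≠ y + k ∧ x ≠ y - k
  · have g1 : ((c.modify y 0 (· + 1)).getD (x - k) 0 = 0 ∧ (c.modify y 0 (· + 1)).getD (x + k) 0 = 0)
        ↔ (c.getD (x - k) 0 = 0 ∧ c.getD (x + k) 0 = 0) := by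
      rw [getD_add_eq_zero c hc, getD_add_eq_zero c hc]
      constructor
      · rintro ⟨⟨a1, _⟩, b1, _⟩; exact ⟨a1, b1⟩
      · rintro ⟨a1, b1⟩; exact ⟨⟨a1, by omega⟩, b1, by omega⟩
    have g2 : ((c.modify x 0 (· + 1)).getD (y - k) 0 = 0 ∧ (c.modify x 0 (· + 1)).getD (y + k) 0 = 0)
        ↔ (c.getD (y - k) 0 = 0 ∧ c.getD (y + k) 0 = 0) := by
      rw [getD_add_eq_zero c hc, getD_add_eq_zero c hc]
      constructor
      · rintro ⟨⟨a1, _⟩, b1, _⟩; exact ⟨a1, b1⟩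
      · rintro ⟨a1, b1⟩; exact ⟨⟨a1, by omega⟩, b1, by omega⟩
    rw [if_congr g1 rfl rfl, if_congr g2 rfl rfl]
    split_ifs <;> ring
  · have g1 : ¬ ((c.modify y 0 (· + 1)).getD (x - k) 0 = 0 ∧ (c.modify y 0 (· + 1)).getD (x + k) 0 = 0) := by
      rw [getD_add_eq_zero c hc, getD_add_eq_zero c hc]
      rintro ⟨⟨_, a2⟩, _, b2⟩
      exact hR ⟨by omega, by omega⟩
    have g2 : ¬ ((c.modify x 0 (· + 1)).getD (y - k) 0 = 0 ∧ (c.modify x 0 (· + 1)).getD (y + k) 0 = 0) := by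
      rw [getD_add_eq_zero c hc, getD_add_eq_zero c hc]
      rintro ⟨⟨_, a2⟩, _, b2⟩
      exact hR ⟨by omega, by omega⟩
    rw [if_neg g1, if_neg g2]
    split_ifs <;> ring

theorem pvBT_perm (k : Int) : ∀ {l l' : List Int}, l.Perm l' →
    ∀ c : PySem.Dict Int Int, pvNN c → pvBT k c l = pvBT k c l' := by
  intro l l' h
  induction h with
  | nil => intro c _; rfl
  | cons x _ ih =>
      intro c hc
      rw [pvBT_cons, pvBT_cons, ih c hc]
      congr 1
      split_ifs with h
      · exact ih _ (pvNN_add c x hc)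
      · rfl
  | swap x y l => intro c hc; exact pvBT_swap k x y l c hc
  | trans _ _ ih1 ih2 => intro c hc; rw [ih1 c hc, ih2 c hc]

-- ---- B-side: a block of equal values, then a whole sorted residue class ----
theorem pvBT_rep (k v : Int) (hk : k ≠ 0) : ∀ (m : Nat) (l : List Int) (c : PySem.Dict Int Int),
    pvNN c →
    pvBT k c (List.replicate m v ++ l) =
      if c.getD (v - k) 0 = 0 ∧ c.getD (v + k) 0 = 0 then
        pvBT k c l + ((2 : Int) ^ m - 1) * pvBT k (c.modify v 0 (· + 1)) l
      else pvBT k c l := by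
  intro m
  induction m with
  | zero =>
      intro l c hc
      simp only [List.replicate_zero, List.nil_append, pow_zero]
      split_ifs <;> ring
  | succ m ih =>
      intro l c hc
      rw [List.replicate_succ, List.cons_append, pvBT_cons, ih l c hc]
      by_cases hok : c.getD (v - k) 0 = 0 ∧ c.getD (v + k) 0 = 0
      · rw [if_pos hok, if_pos hok, if_pos hok, ih l _ (pvNN_add c v hc)]
        have hok2 : (c.modify v 0 (· + 1)).getD (v - k) 0 = 0 ∧
            (c.modify v 0 (· + 1)).getD (v + k) 0 = 0 := by
          rw [getD_add_eq_zero c hc, getD_add_eq_zero c hc]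
          exact ⟨⟨hok.1, by omega⟩, ⟨hok.2, by omega⟩⟩
        rw [if_pos hok2]
        have hDD : pvBT k ((c.modify v 0 (· + 1)).modify v 0 (· + 1)) l
            = pvBT k (c.modify v 0 (· + 1)) l := by
          apply pvBT_congr k l _ _ (pvNN_add _ v (pvNN_add c v hc)) (pvNN_add c v hc)
          intro z _
          rw [getD_add_eq_zero _ (pvNN_add c v hc), getD_add_eq_zero _ (pvNN_add c v hc),
            getD_add_eq_zero c hc, getD_add_eq_zero c hc]
          have hvv : ¬ ((c.modify v 0 (· + 1)).getD v 0 = 0) := by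
            rw [PySem.Dict.getD_modify, if_pos rfl]
            have := hc v; omega
          constructor <;> constructor <;> tauto
        rw [hDD, pow_succ]
        ring
      · simp only [if_neg hok]; ring

theorem pvBT_groups (k : Int) (hk : 1 ≤ k) :
    ∀ (gs : List (Int × Int)) (c : PySem.Dict Int Int), pvNN c →
    List.Pairwise (fun p q : Int × Int => p.1 + k ≤ q.1) gs →
    (∀ p ∈ gs, c.getD (p.1 + k) 0 = 0) →
    (∀ p ∈ gs.tail, c.getD (p.1 - k) 0 = 0) →
    pvBT k c (gs.flatMap (fun p => List.replicate p.2.toNat p.1)) =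
      (match gs with
       | [] => 1
       | (v, _) :: rest => if c.getD (v - k) 0 = 0 then pvF k gs else pvF k rest) := by
  intro gs
  induction gs with
  | nil => intro c _ _ _ _; rfl
  | cons p rest ih =>
      obtain ⟨v, m⟩ := p
      intro c hc hpair hplus hminus
      show _ = if c.getD (v - k) 0 = 0 then pvF k ((v, m) :: rest) else pvF k rest
      have hplus_head : c.getD (v + k) 0 = 0 := hplus (v, m) (List.mem_cons_self ..)
      have hpair_rest := (List.pairwise_cons.mp hpair).2
      have hgap : ∀ q ∈ rest, v + k ≤ q.1 := (List.pairwise_cons.mp hpair).1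
      have hminus' : ∀ q ∈ rest, c.getD (q.1 - k) 0 = 0 := hminus
      rw [List.flatMap_cons, pvBT_rep k v (by omega) m.toNat _ c hc]
      have hrest_c : pvBT k c (rest.flatMap (fun p => List.replicate p.2.toNat p.1)) = pvF k rest := by
        rw [ih c hc hpair_rest (fun q hq => hplus q (List.mem_cons_of_mem _ hq))
          (fun q hq => hminus' q (List.mem_of_mem_tail hq))]
        cases rest with
        | nil => rfl
        | cons q r2 =>
            obtain ⟨v2, m2⟩ := q
            show (if c.getD (v2 - k) 0 = 0 then pvF k ((v2, m2) :: r2) else pvF k r2)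
                = pvF k ((v2, m2) :: r2)
            rw [if_pos (hminus' (v2, m2) (List.mem_cons_self ..))]
      by_cases hvk : c.getD (v - k) 0 = 0
      · rw [if_pos (⟨hvk, hplus_head⟩ : _ ∧ _), if_pos hvk, hrest_c]
        have hrest_cv : pvBT k (c.modify v 0 (· + 1))
              (rest.flatMap (fun p => List.replicate p.2.toNat p.1)) = pvH k v rest := by
          rw [ih (c.modify v 0 (· + 1)) (pvNN_add c v hc) hpair_rest
            (by
              intro q hq
              rw [getD_add_eq_zero c hc]
              exact ⟨hplus q (List.mem_cons_of_mem _ hq), by have := hgap q hq; omega⟩)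
            (by
              intro q hq
              rw [getD_add_eq_zero c hc]
              refine ⟨hminus' q (List.mem_of_mem_tail hq), ?_⟩
              cases rest with
              | nil => simp at hq
              | cons q2 r2 =>
                  have hq2 : v + k ≤ q2.1 := hgap q2 (List.mem_cons_self ..)
                  have hq3 : q2.1 + k ≤ q.1 :=
                    (List.pairwise_cons.mp hpair_rest).1 q (show q ∈ r2 from hq)
                  omega)]
          cases rest with
          | nil => rfl
          | cons q r2 =>
              obtain ⟨v2, m2⟩ := q
              show (if (c.modify v 0 (· + 1)).getD (v2 - k) 0 = 0
                  then pvF k ((v2, m2) :: r2) else pvF k r2) = pvH k v ((v2, m2) :: r2)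
              rw [pvH_cons]
              have hm2 : c.getD (v2 - k) 0 = 0 := hminus' (v2, m2) (List.mem_cons_self ..)
              by_cases he : v2 = v + k
              · rw [if_pos he, if_neg
                  (fun h => by have := (getD_add_eq_zero c hc v (v2 - k)).mp h; omega)]
              · rw [if_neg he, if_pos ((getD_add_eq_zero c hc v (v2 - k)).mpr ⟨hm2, by omega⟩)]
        rw [hrest_cv, pvF_cons]
      · rw [if_neg (fun hb => hvk hb.1), if_neg hvk, hrest_c]

-- ---- Python floor-mod arithmetic: shifting by k does not change the residue ----
theorem pvModDvd (n k : Int) : k ∣ (n - PySem.Int.mod n k) := by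
  refine ⟨PySem.Int.floordiv n k, ?_⟩
  have h := PySem.Int.floordiv_mul_add_mod n k
  linarith [mul_comm k (PySem.Int.floordiv n k)]

theorem pvModShift (k : Int) (hk : 0 < k) (a t : Int) :
    PySem.Int.mod (a + t * k) k = PySem.Int.mod a k := by
  have d1 := pvModDvd (a + t * k) k
  have d2 := pvModDvd a k
  have hd : k ∣ (PySem.Int.mod (a + t * k) k - PySem.Int.mod a k) := by
    have he : PySem.Int.mod (a + t * k) k - PySem.Int.mod a k
        = t * k - ((a + t * k) - PySem.Int.mod (a + t * k) k) + (a - PySem.Int.mod a k) := by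
      ring
    rw [he]
    exact dvd_add (dvd_sub ⟨t, by ring⟩ d1) d2
  have b1 := PySem.Int.mod_nonneg (a + t * k) hk
  have b2 := PySem.Int.mod_lt (a + t * k) hk
  have b3 := PySem.Int.mod_nonneg a hk
  have b4 := PySem.Int.mod_lt a hk
  rcases hd with ⟨u, hu⟩
  have h1 : u < 1 := Int.lt_of_mul_lt_mul_left (by linarith : k * u < k * 1) (by omega)
  have h2 : -1 < u := Int.lt_of_mul_lt_mul_left (by linarith : k * (-1) < k * u) (by omega)
  have hu0 : u = 0 := by omega
  rw [hu0, mul_zero] at hu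
  linarith

theorem pvModAdd (k : Int) (hk : 0 < k) (y : Int) :
    PySem.Int.mod (y + k) k = PySem.Int.mod y k := by
  have h := pvModShift k hk y 1
  rw [show y + 1 * k = y + k by ring] at h
  exact h

theorem pvModSub (k : Int) (hk : 0 < k) (y : Int) :
    PySem.Int.mod (y - k) k = PySem.Int.mod y k := by
  have h := pvModShift k hk y (-1)
  rw [show y + (-1) * k = y - k by ring] at h
  exact h

-- ---- sorted2 on distinct first keys is sorting by the first key ----
theorem insertBy_congr {α : Type} (b1 b2 : α → α → Bool) :
    ∀ (acc : List α) (x : α), (∀ y ∈ acc, b1 x y = b2 x y) →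
    PySem.List.insertBy b1 x acc = PySem.List.insertBy b2 x acc := by
  intro acc
  induction acc with
  | nil => intro x _; rfl
  | cons y ys ih =>
      intro x h
      show (if b1 x y = true then x :: y :: ys else y :: PySem.List.insertBy b1 x ys)
          = (if b2 x y = true then x :: y :: ys else y :: PySem.List.insertBy b2 x ys)
      rw [h y (List.mem_cons_self ..), ih x (fun z hz => h z (List.mem_cons_of_mem _ hz))]

theorem foldl_insertBy_congr {α : Type} (b1 b2 : α → α → Bool) :
    ∀ (xs acc : List α),
    (∀ x y, (x ∈ xs ∨ x ∈ acc) → (y ∈ xs ∨ y ∈ acc) → b1 x y = b2 x y) →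
    List.foldl (fun acc x => PySem.List.insertBy b1 x acc) acc xs
      = List.foldl (fun acc x => PySem.List.insertBy b2 x acc) acc xs := by
  intro xs
  induction xs with
  | nil => intro acc _; rfl
  | cons x xs ih =>
      intro acc h
      simp only [List.foldl_cons]
      rw [insertBy_congr b1 b2 acc x
        (fun y hy => h x y (Or.inl (List.mem_cons_self ..)) (Or.inr hy))]
      apply ih
      intro a b ha hb
      have hmem : ∀ z, (z ∈ xs ∨ z ∈ PySem.List.insertBy b2 x acc) → (z ∈ x :: xs ∨ z ∈ acc) := by
        intro z hz
        rcases hz with hz | hz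
        · exact Or.inl (List.mem_cons_of_mem _ hz)
        · rcases (PySem.List.mem_insertBy ..).mp hz with hz | hz
          · exact Or.inl (hz ▸ List.mem_cons_self ..)
          · exact Or.inr hz
      exact h a b (hmem a ha) (hmem b hb)

theorem sorted2_eq_sorted_fst (xs : List (Int × Int))
    (hinj : ∀ p ∈ xs, ∀ q ∈ xs, p.1 = q.1 → p = q) :
    PySem.List.sorted2 xs (fun p => p.1) (fun p => p.2)
      = PySem.List.sorted xs (fun p => p.1) := by
  have h := foldl_insertBy_congr
    (fun a b : Int × Int => decide (a.1 < b.1) || !decide (b.1 < a.1) && decide (a.2 < b.2))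
    (fun a b : Int × Int => decide (a.1 < b.1)) xs []
    (by
      intro p q hp hq
      have hp' : p ∈ xs := by rcases hp with h | h; exact h; simp at h
      have hq' : q ∈ xs := by rcases hq with h | h; exact h; simp at h
      rcases lt_trichotomy p.1 q.1 with h1 | h1 | h1
      · simp [h1, lt_asymm h1]
      · have : p = q := hinj p hp' q hq' h1
        subst this
        simp
      · show (decide (p.1 < q.1) || !decide (q.1 < p.1) && decide (p.2 < q.2))
            = decide (p.1 < q.1)
        have ha : decide (p.1 < q.1) = false := by simp [lt_asymm h1]
        have hb : decide (q.1 < p.1) = true := by simp [h1]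
        rw [ha, hb]
        simp)
  exact h

-- ---- the sorted Counter items of a list, named: sorted distinct values with their counts ----
def pvGroups (bu : List Int) : List (Int × Int) :=
  (PySem.List.sorted (PySem.Set.ofList bu) (fun x => x)).map (fun v => (v, (bu.count v : Int)))

theorem mem_items_counter_char (bu : List Int) :
    ∀ p ∈ (PySem.Dict.counter bu).items, p = (p.1, (bu.count p.1 : Int)) ∧ p.1 ∈ bu := by
  intro p hp
  rw [PySem.Dict.items_counter] at hp
  rcases List.mem_map.mp hp with ⟨v, hv, hpv⟩
  subst hpv
  exact ⟨rfl, (PySem.Set.mem_ofList ..).mp hv⟩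

theorem sorted2_items_eq (bu : List Int) :
    PySem.List.sorted2 (PySem.Dict.counter bu).items (fun p => p.1) (fun p => p.2)
      = pvGroups bu := by
  rw [sorted2_eq_sorted_fst _ (by
    intro p hp q hq h1
    have e1 := (mem_items_counter_char bu p hp).1
    have e2 := (mem_items_counter_char bu q hq).1
    rw [e1, e2, h1])]
  apply PySem.List.sorted_eq_of_perm_of_pairwise_lt
  · rw [PySem.Dict.items_counter]
    exact (PySem.List.sorted_perm (PySem.Set.ofList bu) (fun x => x) false).map _
  · unfold pvGroups
    rw [List.pairwise_map]
    exact PySem.List.sorted_ofList_pairwise_lt bu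

theorem flatMap_map' {α β γ : Type} (f : α → β) (g : β → List γ) :
    ∀ l : List α, (l.map f).flatMap g = l.flatMap (fun a => g (f a)) := by
  intro l
  induction l with
  | nil => rfl
  | cons x xs ih => simp only [List.map_cons, List.flatMap_cons, ih]

theorem count_flatGroups (bu : List Int) (x : Int) : ∀ (vs : List Int), vs.Nodup →
    List.count x (vs.flatMap (fun v => List.replicate ((bu.count v : Int)).toNat v))
      = if x ∈ vs then bu.count x else 0 := by
  intro vs
  induction vs with
  | nil => intro _; simp
  | cons v vs ih =>
      intro hnd
      rw [List.flatMap_cons, List.count_append, ih (List.nodup_cons.mp hnd).2,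
        List.count_replicate]
      by_cases hvx : v = x
      · subst hvx
        have hnm : v ∉ vs := (List.nodup_cons.mp hnd).1
        simp [hnm, Int.toNat_natCast]
      · have hxv : ¬ (x = v) := fun h => hvx h.symm
        have hbeq : (v == x) = false := by simp [hvx]
        simp [hbeq, List.mem_cons, hxv]

theorem flatGroups_perm (bu : List Int) :
    ((pvGroups bu).flatMap (fun p => List.replicate p.2.toNat p.1)).Perm bu := by
  unfold pvGroups
  rw [flatMap_map']
  refine ((PySem.List.sorted_perm (PySem.Set.ofList bu) (fun x => x) false).flatMap
    (fun a _ => List.Perm.refl _)).trans ?_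
  rw [List.perm_iff_count]
  intro x
  rw [count_flatGroups bu x (PySem.Set.ofList bu) (PySem.Set.nodup_ofList bu)]
  by_cases hx : x ∈ PySem.Set.ofList bu
  · rw [if_pos hx]
  · rw [if_neg hx]
    symm
    rw [List.count_eq_zero]
    intro hmem
    exact hx ((PySem.Set.mem_ofList ..).mpr hmem)

-- ---- one residue class: backtracking over the class equals the pvF value of its sorted items ----
theorem classEval (k : Int) (hk : 1 ≤ k) (r : Int) (bu : List Int)
    (hres : ∀ n ∈ bu, PySem.Int.mod n k = r) :
    pvBT k PySem.Dict.empty bu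
      = pvF k (PySem.List.sorted2 (PySem.Dict.counter bu).items (fun p => p.1) (fun p => p.2)) := by
  rw [sorted2_items_eq]
  rw [← pvBT_perm k (flatGroups_perm bu) PySem.Dict.empty pvNN_empty]
  have hpair : List.Pairwise (fun p q : Int × Int => p.1 + k ≤ q.1) (pvGroups bu) := by
    unfold pvGroups
    rw [List.pairwise_map]
    refine (PySem.List.sorted_ofList_pairwise_lt bu).imp_of_mem ?_
    intro a b ha hb hab
    have ha' : a ∈ bu := (PySem.Set.mem_ofList ..).mp
      ((PySem.List.mem_sorted ..).mp ha)
    have hb' : b ∈ bu := (PySem.Set.mem_ofList ..).mp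
      ((PySem.List.mem_sorted ..).mp hb)
    have hdvd : k ∣ (b - a) := by
      have h1 := pvModDvd a k
      have h2 := pvModDvd b k
      have he : b - a = (b - PySem.Int.mod b k) - (a - PySem.Int.mod a k) := by
        rw [hres a ha', hres b hb']
        ring
      rw [he]
      exact dvd_sub h2 h1
    have := Int.le_of_dvd (by omega) hdvd
    omega
  rw [pvBT_groups k hk (pvGroups bu) PySem.Dict.empty pvNN_empty hpair
    (fun p _ => PySem.Dict.getD_empty _ _) (fun p _ => PySem.Dict.getD_empty _ _)]
  cases hg : pvGroups bu with
  | nil => rfl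
  | cons p rest =>
      obtain ⟨v, m⟩ := p
      show (if (PySem.Dict.empty : PySem.Dict Int Int).getD (v - k) 0 = 0
          then pvF k ((v, m) :: rest) else pvF k rest) = pvF k ((v, m) :: rest)
      rw [if_pos (PySem.Dict.getD_empty _ _)]

-- ---- separated concatenation factorizes the backtracking count ----
theorem pvBT_append (k : Int) : ∀ (l1 l2 : List Int) (c : PySem.Dict Int Int), pvNN c →
    (∀ y ∈ l2, c.getD (y - k) 0 = 0 ∧ c.getD (y + k) 0 = 0 ∧ (y - k) ∉ l1 ∧ (y + k) ∉ l1) →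
    pvBT k c (l1 ++ l2) = pvBT k c l1 * pvBT k PySem.Dict.empty l2 := by
  intro l1
  induction l1 with
  | nil =>
      intro l2 c hc h
      simp only [List.nil_append]
      have : pvBT k c l2 = pvBT k PySem.Dict.empty l2 := by
        apply pvBT_congr k l2 c PySem.Dict.empty hc pvNN_empty
        intro y hy
        rw [PySem.Dict.getD_empty, PySem.Dict.getD_empty]
        exact ⟨by simp [(h y hy).1], by simp [(h y hy).2.1]⟩
      rw [this]
      show _ = 1 * _
      ring
  | cons x l1 ih =>
      intro l2 c hc h
      rw [List.cons_append, pvBT_cons, pvBT_cons]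
      have h' : ∀ y ∈ l2, c.getD (y - k) 0 = 0 ∧ c.getD (y + k) 0 = 0 ∧
          (y - k) ∉ l1 ∧ (y + k) ∉ l1 := by
        intro y hy
        obtain ⟨h1, h2, h3, h4⟩ := h y hy
        exact ⟨h1, h2, fun hm => h3 (List.mem_cons_of_mem _ hm),
          fun hm => h4 (List.mem_cons_of_mem _ hm)⟩
      rw [ih l2 c hc h']
      split_ifs with hP
      · rw [ih l2 (c.modify x 0 (· + 1)) (pvNN_add c x hc) (by
          intro y hy
          obtain ⟨h1, h2, h3, h4⟩ := h y hy
          refine ⟨?_, ?_, fun hm => h3 (List.mem_cons_of_mem _ hm),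
            fun hm => h4 (List.mem_cons_of_mem _ hm)⟩
          · rw [getD_add_eq_zero c hc]
            exact ⟨h1, fun he => h3 (he ▸ List.mem_cons_self ..)⟩
          · rw [getD_add_eq_zero c hc]
            exact ⟨h2, fun he => h4 (he ▸ List.mem_cons_self ..)⟩)]
        ring
      · ring

-- ---- the whole list is the concatenation of its residue classes, class by class ----
theorem resSplit (k : Int) (hk : 1 ≤ k) : ∀ (m : Nat) (l : List Int),
    (∀ n ∈ l, (PySem.Int.mod n k).toNat < m) →
    (((List.range m).map (fun i : Nat => l.filter (fun n => PySem.Int.mod n k == (i : Int)))).flatten).Perm l := by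
  intro m
  induction m with
  | zero =>
      intro l h
      have : l = [] := by
        cases l with
        | nil => rfl
        | cons a t => exact absurd (h a (List.mem_cons_self ..)) (by omega)
      subst this
      simp
  | succ m ih =>
      intro l h
      rw [List.range_succ, List.map_append, List.flatten_append]
      simp only [List.map_cons, List.map_nil, List.flatten_cons, List.flatten_nil,
        List.append_nil]
      have hcl : ∀ i ∈ List.range m,
          l.filter (fun n => PySem.Int.mod n k == (i : Int))
            = (l.filter (fun n => !(PySem.Int.mod n k == (m : Int)))).filter
                (fun n => PySem.Int.mod n k == (i : Int)) := by
        intro i hi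
        rw [List.mem_range] at hi
        rw [List.filter_filter]
        apply List.filter_congr
        intro n _
        by_cases hmod : PySem.Int.mod n k = (i : Int)
        · have hne : ¬ (PySem.Int.mod n k = (m : Int)) := by omega
          simp only [hmod]
          simp
          omega
        · simp [hmod]
      rw [List.map_congr_left hcl]
      have hperm := ih (l.filter (fun n => !(PySem.Int.mod n k == (m : Int)))) (by
        intro n hn
        have h1 := h n (List.mem_filter.mp hn).1
        have h2 := (List.mem_filter.mp hn).2
        have h3 : ¬ (PySem.Int.mod n k = (m : Int)) := by simpa using h2
        have h0 := PySem.Int.mod_nonneg n (by omega : (0:Int) < k)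
        omega)
      refine (hperm.append_right _).trans ?_
      have := List.filter_append_perm (fun n => !(PySem.Int.mod n k == (m : Int))) l
      simpa using this

-- ---- product over the residue classes ----
theorem pvBT_classList (k : Int) (hk : 1 ≤ k) (nums : List Int) :
    ∀ rs : List Int, rs.Nodup →
    pvBT k PySem.Dict.empty
        ((rs.map (fun r => nums.filter (fun n => PySem.Int.mod n k == r))).flatten)
      = (rs.map (fun r =>
          pvBT k PySem.Dict.empty (nums.filter (fun n => PySem.Int.mod n k == r)))).prod := by
  intro rs
  induction rs with
  | nil => intro _; rfl
  | cons r rs ih =>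
      intro hnd
      rw [List.map_cons, List.flatten_cons, List.map_cons, List.prod_cons]
      rw [pvBT_append k _ _ PySem.Dict.empty pvNN_empty (by
        intro y hy
        rcases List.mem_flatten.mp hy with ⟨cls, hcls, hycls⟩
        rcases List.mem_map.mp hcls with ⟨r', hr', hclr⟩
        subst hclr
        have hym : PySem.Int.mod y k = r' := by
          simpa using (List.mem_filter.mp hycls).2
        have hrr : r' ≠ r := fun he => (List.nodup_cons.mp hnd).1 (he ▸ hr')
        refine ⟨PySem.Dict.getD_empty _ _, PySem.Dict.getD_empty _ _, ?_, ?_⟩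
        · intro hm
          have := (List.mem_filter.mp hm).2
          have h2 : PySem.Int.mod (y - k) k = r := by simpa using this
          rw [pvModSub k (by omega) y, hym] at h2
          exact hrr h2
        · intro hm
          have := (List.mem_filter.mp hm).2
          have h2 : PySem.Int.mod (y + k) k = r := by simpa using this
          rw [pvModAdd k (by omega) y, hym] at h2
          exact hrr h2)]
      rw [ih (List.nodup_cons.mp hnd).2]

-- ---- B's value as the same residue-class product that A computes ----
theorem altB_eq (nums : List Int) (k : Int) (hk : 1 ≤ k) :
    beautifulSubsets_alt nums k
      = ((List.range k.toNat).map (fun i : Nat =>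
          if nums.filter (fun n => PySem.Int.mod n k == (i : Int)) = [] then 1
          else pvG nums k (i : Int))).prod - 1 := by
  simp only [beautifulSubsets_alt]
  congr 1
  have hperm := resSplit k hk k.toNat nums (by
    intro n _
    have h0 := PySem.Int.mod_nonneg n (by omega : (0:Int) < k)
    have h1 := PySem.Int.mod_lt n (by omega : (0:Int) < k)
    omega)
  rw [← pvBT_perm k hperm PySem.Dict.empty pvNN_empty]
  have hsets : ((List.range k.toNat).map
        (fun i : Nat => nums.filter (fun n => PySem.Int.mod n k == (i : Int))))
      = (((List.range k.toNat).map (fun i : Nat => (i : Int))).map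
          (fun r => nums.filter (fun n => PySem.Int.mod n k == r))) := by
    rw [List.map_map]
    rfl
  rw [hsets, pvBT_classList k hk nums _
    (List.Nodup.map (fun a b h => by exact_mod_cast h) (List.nodup_range)), List.map_map]
  apply congrArg List.prod
  apply List.map_congr_left
  intro i hi
  show pvBT k PySem.Dict.empty (nums.filter (fun n => PySem.Int.mod n k == (i : Int)))
      = if nums.filter (fun n => PySem.Int.mod n k == (i : Int)) = [] then 1
        else pvG nums k (i : Int)
  rw [classEval k hk (i : Int) _ (by
    intro n hn
    simpa using (List.mem_filter.mp hn).2)]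
  by_cases hf : nums.filter (fun n => PySem.Int.mod n k == (i : Int)) = []
  · rw [if_pos hf]
    show pvF k (PySem.List.sorted2 (PySem.Dict.counter
        (nums.filter (fun n => PySem.Int.mod n k == (i : Int)))).items
        (fun p => p.1) (fun p => p.2)) = 1
    rw [hf]
    rfl
  · rw [if_neg hf]
    rfl

-- ===== VERDICT (by name: the statement is the Claim_ definition above) =====
theorem beautifulSubsets_spec : Claim_equal_beautifulSubsets := by
  intro nums k _ hpre
  unfold Spec_beautifulSubsets
  by_cases hnil : nums = []
  · subst hnil
    show beautifulSubsets [] k = beautifulSubsets_alt [] k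
    simp [beautifulSubsets, beautifulSubsets_alt, foldl_if_mul_prod, List.map_replicate, pvBT]
  · have hk : 1 ≤ k := hpre.resolve_right hnil
    rw [portA_eq nums k hk, altB_eq nums k hk]
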